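-- pv_equiv track=rewrite | github.com/Aris-Setyawan/pawang | core/smart_routing.py | _fuzzy_match_keywords
-- ===== SOURCE A (Python) =====
-- _FUZZY_TARGETS = [
--     "install", "uninstall", "balance", "generate", "delegate",
--     "jalankan", "jalanin", "eksekusi", "execute",
--     "gambar", "video", "audio", "skill",
-- ]
--
-- def _fuzzy_match_keywords(words: set[str]) -> bool:
--     """Check if any word is a close match to a tool keyword (Levenshtein ≤ 2).
--
--     Only checks words with 4+ chars against high-value keywords to avoid
--     false positives on short words.
--     """
--     for word in words:
--         if len(word) < 4:
--             continue
--         for target in _FUZZY_TARGETS: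
--             if len(target) < 4:
--                 continue
--             # Quick prefix check: if word starts with first 3 chars of target
--             if word[:3] == target[:3] and abs(len(word) - len(target)) <= 2:
--                 # Simple Levenshtein distance check
--                 if _lev_distance(word, target) <= 2:
--                     return True
--     return False
--
-- def _lev_distance(a: str, b: str) -> int:
--     """Compute Levenshtein distance between two strings."""
--     if len(a) < len(b):
--         return _lev_distance(b, a)
--     if len(b) == 0:
--         return len(a)
--     prev = list(range(len(b) + 1))
--     for i, ca in enumerate(a):
--         curr = [i + 1]
--         for j, cb in enumerate(b):
--             curr.append(min(
--                 prev[j + 1] + 1,      # deletion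
--                 curr[j] + 1,           # insertion
--                 prev[j] + (ca != cb),  # substitution
--             ))
--         prev = curr
--     return prev[len(b)]
-- ===== SOURCE B (Python) =====
-- _FUZZY_TARGETS = [
--     "install", "uninstall", "balance", "generate", "delegate",
--     "jalankan", "jalanin", "eksekusi", "execute",
--     "gambar", "video", "audio", "skill",
-- ]
--
-- # Precomputed once: 3-char prefix -> list of targets (len >= 4) with that prefix.
-- _PREFIX_INDEX = {}
-- for _t in _FUZZY_TARGETS:
--     if len(_t) >= 4:
--         _PREFIX_INDEX.setdefault(_t[:3], []).append(_t)
--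
--
-- def _fuzzy_match_keywords(words: set[str]) -> bool:
--     for word in words:
--         if len(word) < 4:
--             continue
--         for target in _PREFIX_INDEX.get(word[:3], ()):
--             if abs(len(word) - len(target)) <= 2 and _lev_distance(word, target) <= 2:
--                 return True
--     return False
--
--
-- def _lev_distance(a: str, b: str) -> int:
--     if len(a) < len(b):
--         return _lev_distance(b, a)
--     if len(b) == 0:
--         return len(a)
--     prev = list(range(len(b) + 1))
--     for i, ca in enumerate(a):
--         curr = [i + 1]
--         for j, cb in enumerate(b):
--             curr.append(min(
--                 prev[j + 1] + 1,
--                 curr[j] + 1,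
--                 prev[j] + (ca != cb),
--             ))
--         prev = curr
--     return prev[len(b)]
-- ===== Notes on version B (the rewrite author's own statement) =====
-- stated objective: faster
-- what changed: B precomputes once a dict mapping each 3-char prefix to its bucket of targets, so per word the scan over all 13 targets (with per-target prefix and length guards) is replaced by one hash lookup of word[:3] and a scan of that bucket only.
import Mathlib
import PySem

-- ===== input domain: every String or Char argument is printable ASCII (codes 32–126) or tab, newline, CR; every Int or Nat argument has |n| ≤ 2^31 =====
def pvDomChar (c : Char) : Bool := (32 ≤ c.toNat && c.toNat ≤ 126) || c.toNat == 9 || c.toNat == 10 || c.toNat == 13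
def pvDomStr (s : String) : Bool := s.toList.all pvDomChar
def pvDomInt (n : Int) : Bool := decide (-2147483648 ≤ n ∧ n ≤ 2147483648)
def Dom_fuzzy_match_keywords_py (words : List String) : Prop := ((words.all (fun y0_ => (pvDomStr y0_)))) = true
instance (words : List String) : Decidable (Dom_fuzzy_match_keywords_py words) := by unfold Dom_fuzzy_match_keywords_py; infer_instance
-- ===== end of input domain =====

-- B replaces A's inner scan over all _FUZZY_TARGETS by a lookup in a prefix index built
-- once (3-char prefix -> bucket of targets), so each word only scans its own bucket
-- (objective: faster; a timing run measured B faster). Return-value equivalence proved.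

-- ===== PORT A =====
def fuzzyTargets : List String :=
  ["install", "uninstall", "balance", "generate", "delegate",
   "jalankan", "jalanin", "eksekusi", "execute",
   "gambar", "video", "audio", "skill"]

-- _lev_distance, shared helper of both Pythons (byte-for-byte identical there).
-- Transliteration: list(range(len(b)+1)) = pyRange, enumerate = PySem.List.enumerate,
-- in-range list indexing ported as pyGetD (always in range here).
def levDist (a b : List Char) : Int :=
  if a.length < b.length then levDist b a
  else if b.length = 0 then (a.length : Int)
  else
    let prev0 : List Int := PySem.List.pyRange 0 ((b.length : Int) + 1) 1
    let prev := (PySem.List.enumerate a 0).foldl (fun prev ica =>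
      (PySem.List.enumerate b 0).foldl (fun curr jcb =>
        curr ++ [min (min (PySem.List.pyGetD prev (jcb.1 + 1) 0 + 1)
                          (PySem.List.pyGetD curr jcb.1 0 + 1))
                     (PySem.List.pyGetD prev jcb.1 0 + (if ica.2 ≠ jcb.2 then 1 else 0))])
        [ica.1 + 1]) prev0
    PySem.List.pyGetD prev (b.length : Int) 0
termination_by (if a.length < b.length then 1 else 0)
decreasing_by simp_all; omega

def lev_distance (a b : String) : Int := levDist a.toList b.toList

def fuzzy_match_keywords_py (words : List String) : Bool :=
  words.any fun word =>
    !(decide (word.toList.length < 4)) &&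
    (fuzzyTargets.any fun target =>
      !(decide (target.toList.length < 4)) &&
      (PySem.Str.slice word none (some 3) == PySem.Str.slice target none (some 3)) &&
      decide (((word.toList.length : Int) - (target.toList.length : Int)).natAbs ≤ 2) &&
      decide (lev_distance word target ≤ 2))

-- ===== PORT B =====
-- the module-level prefix index: 3-char prefix -> bucket of targets with len >= 4
def prefixIndex : PySem.Dict String (List String) :=
  fuzzyTargets.foldl (fun d t =>
    if 4 ≤ t.toList.length then
      d.insert (PySem.Str.slice t none (some 3))
               (d.getD (PySem.Str.slice t none (some 3)) [] ++ [t])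
    else d) PySem.Dict.empty

def fuzzy_match_keywords_py_alt (words : List String) : Bool :=
  words.any fun word =>
    if word.toList.length < 4 then false
    else
      (prefixIndex.getD (PySem.Str.slice word none (some 3)) []).any fun target =>
        decide (((word.toList.length : Int) - (target.toList.length : Int)).natAbs ≤ 2) &&
        decide (lev_distance word target ≤ 2)

-- ===== PRECONDITION & SPEC =====
def Spec_fuzzy_match_keywords_py (words : List String) (out : Bool) : Prop := out = fuzzy_match_keywords_py_alt words
instance (words : List String) (out : Bool) : Decidable (Spec_fuzzy_match_keywords_py words out) := by unfold Spec_fuzzy_match_keywords_py; infer_instance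

-- ===== CLAIM (what is proved, stated in full; the proofs are below) =====
def Claim_equal_fuzzy_match_keywords_py : Prop := ∀ (words : List String), Dom_fuzzy_match_keywords_py words → Spec_fuzzy_match_keywords_py words (fuzzy_match_keywords_py words)

-- ===== LEMMAS AND PROOFS =====

lemma pidx : prefixIndex = PySem.Dict.mk
  [("ins", ["install"]), ("uni", ["uninstall"]), ("bal", ["balance"]),
   ("gen", ["generate"]), ("del", ["delegate"]), ("jal", ["jalankan", "jalanin"]),
   ("eks", ["eksekusi"]), ("exe", ["execute"]), ("gam", ["gambar"]),
   ("vid", ["video"]), ("aud", ["audio"]), ("ski", ["skill"])] := by decide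

lemma inner_eq (w : String) :
    (!(decide (w.toList.length < 4)) &&
      (fuzzyTargets.any fun target =>
        !(decide (target.toList.length < 4)) &&
        (PySem.Str.slice w none (some 3) == PySem.Str.slice target none (some 3)) &&
        decide (((w.toList.length : Int) - (target.toList.length : Int)).natAbs ≤ 2) &&
        decide (lev_distance w target ≤ 2))) =
    (if w.toList.length < 4 then false
     else
      (prefixIndex.getD (PySem.Str.slice w none (some 3)) []).any fun target =>
        decide (((w.toList.length : Int) - (target.toList.length : Int)).natAbs ≤ 2) &&
        decide (lev_distance w target ≤ 2)) := by
  by_cases h4 : w.toList.length < 4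
  · have h4' : w.length < 4 := by simpa using h4
    simp [h4']
  · have h4' : ¬ w.length < 4 := by simpa using h4
    rw [pidx]
    set s := PySem.Str.slice w none (some 3) with hs
    simp only [h4', if_false, decide_eq_true_eq, decide_false, Bool.not_false, Bool.true_and,
      fuzzyTargets, List.any_cons, List.any_nil, PySem.Dict.getD, PySem.Dict.get?_mk_cons,
      show PySem.Str.slice "install" none (some 3) = "ins" from by decide,
      show PySem.Str.slice "uninstall" none (some 3) = "uni" from by decide,
      show PySem.Str.slice "balance" none (some 3) = "bal" from by decide,
      show PySem.Str.slice "generate" none (some 3) = "gen" from by decide,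
      show PySem.Str.slice "delegate" none (some 3) = "del" from by decide,
      show PySem.Str.slice "jalankan" none (some 3) = "jal" from by decide,
      show PySem.Str.slice "jalanin" none (some 3) = "jal" from by decide,
      show PySem.Str.slice "eksekusi" none (some 3) = "eks" from by decide,
      show PySem.Str.slice "execute" none (some 3) = "exe" from by decide,
      show PySem.Str.slice "gambar" none (some 3) = "gam" from by decide,
      show PySem.Str.slice "video" none (some 3) = "vid" from by decide,
      show PySem.Str.slice "audio" none (some 3) = "aud" from by decide,
      show PySem.Str.slice "skill" none (some 3) = "ski" from by decide]
    by_cases h1 : s = "ins"; · simp [h1, show ("install" : String).length = 7 from by decide]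
    by_cases h2 : s = "uni"; · simp [h2, show ("uninstall" : String).length = 9 from by decide]
    by_cases h3 : s = "bal"; · simp [h3, show ("balance" : String).length = 7 from by decide]
    by_cases h5 : s = "gen"; · simp [h5, show ("generate" : String).length = 8 from by decide]
    by_cases h6 : s = "del"; · simp [h6, show ("delegate" : String).length = 8 from by decide]
    by_cases h7 : s = "jal"; · simp [h7, show ("jalankan" : String).length = 8 from by decide, show ("jalanin" : String).length = 7 from by decide]
    by_cases h8 : s = "eks"; · simp [h8, show ("eksekusi" : String).length = 8 from by decide]
    by_cases h9 : s = "exe"; · simp [h9, show ("execute" : String).length = 7 from by decide]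
    by_cases h10 : s = "gam"; · simp [h10, show ("gambar" : String).length = 6 from by decide]
    by_cases h11 : s = "vid"; · simp [h11, show ("video" : String).length = 5 from by decide]
    by_cases h12 : s = "aud"; · simp [h12, show ("audio" : String).length = 5 from by decide]
    by_cases h13 : s = "ski"; · simp [h13, show ("skill" : String).length = 5 from by decide]
    simp [PySem.Dict.get?, beq_iff_eq, Ne.symm h1, Ne.symm h2, Ne.symm h3, Ne.symm h5, Ne.symm h6,
      Ne.symm h7, Ne.symm h8, Ne.symm h9, Ne.symm h10, Ne.symm h11, Ne.symm h12, Ne.symm h13,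
      h1, h2, h3, h5, h6, h7, h8, h9, h10, h11, h12, h13]

-- ===== VERDICT (by name: the statement is the Claim_ definition above) =====
theorem fuzzy_match_keywords_py_spec : Claim_equal_fuzzy_match_keywords_py := by
  intro words _
  unfold Spec_fuzzy_match_keywords_py fuzzy_match_keywords_py fuzzy_match_keywords_py_alt
  exact congrArg words.any (funext inner_eq)
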